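-- pv_equiv track=rewrite | github.com/jonp69/ImageAI | Main_Code/Main_backend.py | categorize_tags
-- ===== SOURCE A (Python) =====
-- from typing import Dict, List, Set, Optional, Tuple
--
-- DEFAULT_TAG_CATEGORIES = {
--     "hair_color": ["blonde_hair", "brown_hair", "black_hair", "red_hair", "white_hair"],
--     "expression": ["smile", "serious", "angry", "sad", "surprised"],
--     "clothing": ["school_uniform", "dress", "shirt", "jacket"],
--     "body_parts": ["long_hair", "short_hair", "blue_eyes", "brown_eyes"],
--     "background": ["indoors", "outdoors", "simple_background"],
--     "uncategorized": []
-- }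
--
-- def categorize_tags(tag_list: List[str], external_api_url: Optional[str] = None) -> Dict[str, str]:
--     """Categorize a list of tags using either a lookup table or an external API."""
--     if external_api_url:
--         # Placeholder for external API call
--         pass
--
--     result = {}
--     for tag in tag_list:
--         categorized = False
--         for category, tags in DEFAULT_TAG_CATEGORIES.items():
--             if tag in tags:
--                 result[tag] = category
--                 categorized = True
--                 break
--         if not categorized:
--             result[tag] = "uncategorized"
--
--     return result
-- ===== SOURCE B (Python) =====
-- from typing import Dict, List, Optional
--
-- DEFAULT_TAG_CATEGORIES = {
--     "hair_color": ["blonde_hair", "brown_hair", "black_hair", "red_hair", "white_hair"],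
--     "expression": ["smile", "serious", "angry", "sad", "surprised"],
--     "clothing": ["school_uniform", "dress", "shirt", "jacket"],
--     "body_parts": ["long_hair", "short_hair", "blue_eyes", "brown_eyes"],
--     "background": ["indoors", "outdoors", "simple_background"],
--     "uncategorized": []
-- }
--
-- _REVERSE = {tag: category
--             for category, tags in DEFAULT_TAG_CATEGORIES.items()
--             for tag in tags}
--
-- def categorize_tags(tag_list: List[str], external_api_url: Optional[str] = None) -> Dict[str, str]:
--     """Categorize a list of tags using a precomputed reverse index."""
--     if external_api_url:
--         # Placeholder for external API call
--         pass
--     return {tag: _REVERSE.get(tag, "uncategorized") for tag in tag_list}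
-- ===== Notes on version B (the rewrite author's own statement) =====
-- stated objective: faster
-- what changed: Replaces the nested per-tag scan over all category lists (with a categorized flag and break) by a reverse index tag->category built once from DEFAULT_TAG_CATEGORIES, then a single dict-comprehension pass over tag_list with a .get default.
import Mathlib
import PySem

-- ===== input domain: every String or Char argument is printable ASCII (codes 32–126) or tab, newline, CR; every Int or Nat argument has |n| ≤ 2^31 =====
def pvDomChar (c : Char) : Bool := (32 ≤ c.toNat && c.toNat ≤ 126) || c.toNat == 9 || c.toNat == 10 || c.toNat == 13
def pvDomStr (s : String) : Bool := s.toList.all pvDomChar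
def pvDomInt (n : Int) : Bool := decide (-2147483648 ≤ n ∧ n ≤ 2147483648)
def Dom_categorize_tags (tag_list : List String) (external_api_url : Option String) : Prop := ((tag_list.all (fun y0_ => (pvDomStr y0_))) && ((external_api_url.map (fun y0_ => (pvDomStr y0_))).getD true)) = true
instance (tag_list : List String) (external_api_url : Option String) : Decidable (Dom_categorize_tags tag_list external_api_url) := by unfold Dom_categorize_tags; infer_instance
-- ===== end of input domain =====

-- B replaces A's nested per-tag scan over the category lists by a reverse index built once; objective: simpler.

-- ===== PORT A =====
-- DEFAULT_TAG_CATEGORIES.items(), shared module constant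
def pvCatItems : List (String × List String) :=
  [("hair_color", ["blonde_hair", "brown_hair", "black_hair", "red_hair", "white_hair"]),
   ("expression", ["smile", "serious", "angry", "sad", "surprised"]),
   ("clothing", ["school_uniform", "dress", "shirt", "jacket"]),
   ("body_parts", ["long_hair", "short_hair", "blue_eyes", "brown_eyes"]),
   ("background", ["indoors", "outdoors", "simple_background"]),
   ("uncategorized", [])]

-- A's inner 'for category, tags ... if tag in tags: ...; break' loop: first matching category, none if no break fired
def pvLookupA (tag : String) : List (String × List String) → Option String
  | [] => none
  | (category, tags) :: rest => if tag ∈ tags then some category else pvLookupA tag rest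

def categorize_tags (tag_list : List String) (external_api_url : Option String) : List (String × String) :=
  -- the external_api_url branch is a no-op in A
  (tag_list.foldl (fun result tag =>
      match pvLookupA tag pvCatItems with
      | some category => result.insert tag category
      | none => result.insert tag "uncategorized")
    PySem.Dict.empty).items

-- ===== PORT B =====
-- _REVERSE = {tag: category for category, tags in DEFAULT_TAG_CATEGORIES.items() for tag in tags}
def pvReverse : PySem.Dict String String :=
  pvCatItems.foldl (fun d p => p.2.foldl (fun d t => d.insert t p.1) d) PySem.Dict.empty

def categorize_tags_alt (tag_list : List String) (external_api_url : Option String) : List (String × String) :=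
  (tag_list.foldl (fun result tag => result.insert tag (pvReverse.getD tag "uncategorized"))
    PySem.Dict.empty).items

-- ===== PRECONDITION & SPEC =====
def Spec_categorize_tags (tag_list : List String) (external_api_url : Option String) (out : List (String × String)) : Prop := out = categorize_tags_alt tag_list external_api_url
instance (tag_list : List String) (external_api_url : Option String) (out : List (String × String)) : Decidable (Spec_categorize_tags tag_list external_api_url out) := by unfold Spec_categorize_tags; infer_instance

-- ===== CLAIM (what is proved, stated in full; the proofs are below) =====
def Claim_equal_categorize_tags : Prop := ∀ (tag_list : List String) (external_api_url : Option String), Dom_categorize_tags tag_list external_api_url → Spec_categorize_tags tag_list external_api_url (categorize_tags tag_list external_api_url)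

-- ===== LEMMAS AND PROOFS =====

-- the per-tag category A computes equals the reverse-index lookup B performs
lemma lookup_eq (tag : String) :
    (match pvLookupA tag pvCatItems with
     | some category => category
     | none => "uncategorized") = pvReverse.getD tag "uncategorized" := by
  by_cases h : tag ∈ ["blonde_hair", "brown_hair", "black_hair", "red_hair", "white_hair", "smile", "serious", "angry", "sad", "surprised", "school_uniform", "dress", "shirt", "jacket", "long_hair", "short_hair", "blue_eyes", "brown_eyes", "indoors", "outdoors", "simple_background"]
  · fin_cases h <;> decide
  · simp only [List.mem_cons, List.not_mem_nil, or_false, not_or] at h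
    obtain ⟨h0, h1, h2, h3, h4, h5, h6, h7, h8, h9, h10, h11, h12, h13, h14, h15, h16, h17, h18, h19, h20⟩ := h
    simp only [pvCatItems, pvLookupA, pvReverse, List.foldl, List.mem_cons, List.not_mem_nil,
      PySem.Dict.getD_insert, PySem.Dict.getD_empty,
      h0, h1, h2, h3, h4, h5, h6, h7, h8, h9, h10, h11, h12, h13, h14, h15, h16, h17, h18, h19, h20, or_self, if_false]

lemma fold_eq (l : List String) (d : PySem.Dict String String) :
    l.foldl (fun result tag =>
      match pvLookupA tag pvCatItems with
      | some category => result.insert tag category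
      | none => result.insert tag "uncategorized") d
    = l.foldl (fun result tag => result.insert tag (pvReverse.getD tag "uncategorized")) d := by
  induction l generalizing d with
  | nil => rfl
  | cons t l ih =>
    simp only [List.foldl_cons]
    rw [← ih]
    congr 1
    rw [← lookup_eq t]
    cases pvLookupA t pvCatItems <;> rfl

-- ===== VERDICT (by name: the statement is the Claim_ definition above) =====
theorem categorize_tags_spec : Claim_equal_categorize_tags := by
  intro tag_list external_api_url _
  unfold Spec_categorize_tags categorize_tags categorize_tags_alt
  rw [fold_eq]
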